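-- pv_equiv track=rewrite | github.com/Gabighz/Digital-Aristotle | information_retrieval_system/src/feature_selection.py | split_sentences_into_words
-- ===== SOURCE A (Python) =====
-- WORD_INDEX = 0
--
-- BOLD_INDEX = 1
--
-- FONT_SIZE_INDEX = 2
--
-- COLOUR_INDEX = 3
--
-- def split_sentences_into_words(raw_data):
--     # Will contain individual words and their corresponding XML attributes
--     words = []
--
--     for array in raw_data:
--         # Will be used to check if the string is a sentence or a word
--         is_sentence = False
--
--         # If the string contains a space, it is treated as a sentence
--         for character in array[WORD_INDEX]:
--             if character == " ":
--                 is_sentence = True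
--
--         # If the array contains a string which is a sentence, the string is split into words.
--         # Then, each word is appended to the words array.
--         # Else, it is directly appended.
--         if is_sentence:
--             sentence = array[WORD_INDEX].split(" ")
--
--             for element in sentence:
--                 words.append([element, array[BOLD_INDEX], array[FONT_SIZE_INDEX], array[COLOUR_INDEX]])
--
--         else:
--             words.append([array[WORD_INDEX], array[BOLD_INDEX], array[FONT_SIZE_INDEX], array[COLOUR_INDEX]])
--
--     return words
-- ===== SOURCE B (Python) =====
-- WORD_INDEX = 0
--
-- BOLD_INDEX = 1
--
-- FONT_SIZE_INDEX = 2
--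
-- COLOUR_INDEX = 3
--
-- def split_sentences_into_words(raw_data):
--     # Single character-level pass: tokenize the string by hand with a current-word
--     # accumulator, emitting a row at every space and once at the end. No split()
--     # call, no sentence-detection scan, no branching on string shape.
--     words = []
--     for array in raw_data:
--         cur = []
--         for character in array[WORD_INDEX]:
--             if character == " ":
--                 words.append(["".join(cur), array[BOLD_INDEX], array[FONT_SIZE_INDEX], array[COLOUR_INDEX]])
--                 cur = []
--             else:
--                 cur.append(character)
--         words.append(["".join(cur), array[BOLD_INDEX], array[FONT_SIZE_INDEX], array[COLOUR_INDEX]])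
--     return words
-- ===== Notes on version B (the rewrite author's own statement) =====
-- stated objective: alternative
-- what changed: Replaced the sentence-detection scan plus split(" ")/direct-append branches by a single hand-written character-level tokenizer that accumulates the current word and emits a row at each space and once at the end, so no split() call and no branching on string shape remain.
import Mathlib
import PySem

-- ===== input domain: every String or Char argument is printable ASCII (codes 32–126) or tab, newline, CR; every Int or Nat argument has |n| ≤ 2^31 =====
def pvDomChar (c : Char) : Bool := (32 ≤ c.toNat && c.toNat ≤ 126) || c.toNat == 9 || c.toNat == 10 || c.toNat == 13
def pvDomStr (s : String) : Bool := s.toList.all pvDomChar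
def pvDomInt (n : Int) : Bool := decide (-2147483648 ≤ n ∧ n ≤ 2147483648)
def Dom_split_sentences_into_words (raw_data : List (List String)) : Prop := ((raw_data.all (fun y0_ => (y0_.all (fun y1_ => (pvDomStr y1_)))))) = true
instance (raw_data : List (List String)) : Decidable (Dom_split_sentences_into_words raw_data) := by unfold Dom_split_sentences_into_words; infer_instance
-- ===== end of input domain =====

-- B replaces A's sentence-detection scan and split(" ")/append branches by a single
-- character-level tokenizer emitting rows directly; objective: alternative.

-- ===== PORT A =====
def split_sentences_into_words (raw_data : List (List String)) : List (List String) :=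
  raw_data.foldl (fun words array =>
    let w := PySem.List.pyGetD array 0 ""
    -- inner loop: for character in array[WORD_INDEX]: if character == " ": is_sentence = True
    let is_sentence := w.toList.foldl (fun b c => if c = ' ' then true else b) false
    if is_sentence then
      words ++ ((PySem.Str.split? w " ").getD []).map (fun e =>
        [e, PySem.List.pyGetD array 1 "", PySem.List.pyGetD array 2 "", PySem.List.pyGetD array 3 ""])
    else
      words ++ [[w, PySem.List.pyGetD array 1 "", PySem.List.pyGetD array 2 "", PySem.List.pyGetD array 3 ""]]) []

-- ===== PORT B =====
def split_sentences_into_words_alt (raw_data : List (List String)) : List (List String) :=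
  raw_data.foldl (fun words array =>
    let a1 := PySem.List.pyGetD array 1 ""
    let a2 := PySem.List.pyGetD array 2 ""
    let a3 := PySem.List.pyGetD array 3 ""
    -- inner loop over the characters, state = (words so far, current word chars)
    let st := (PySem.List.pyGetD array 0 "").toList.foldl
      (fun (p : List (List String) × List Char) character =>
        if character = ' ' then (p.1 ++ [[String.ofList p.2, a1, a2, a3]], [])
        else (p.1, p.2 ++ [character])) (words, [])
    st.1 ++ [[String.ofList st.2, a1, a2, a3]]) []

-- ===== PRECONDITION & SPEC =====
-- Pre_ excludes inputs where some inner list has fewer than 4 elements: there the Python A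
-- (and the Python B) raise IndexError on array[3]/array[1]/…, returning nothing.
def Pre_split_sentences_into_words (raw_data : List (List String)) : Prop :=
  ∀ a ∈ raw_data, 4 ≤ a.length
instance (raw_data : List (List String)) : Decidable (Pre_split_sentences_into_words raw_data) := by unfold Pre_split_sentences_into_words; infer_instance

def pvWitness_split_sentences_into_words : List (List String) :=
  [["hello world", "1", "12", "0"], ["word", "0", "10", "2"]]

def Spec_split_sentences_into_words (raw_data : List (List String)) (out : List (List String)) : Prop := out = split_sentences_into_words_alt raw_data
instance (raw_data : List (List String)) (out : List (List String)) : Decidable (Spec_split_sentences_into_words raw_data out) := by unfold Spec_split_sentences_into_words; infer_instance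

-- ===== CLAIM (what is proved, stated in full; the proofs are below) =====
def Claim_equal_split_sentences_into_words : Prop := ∀ (raw_data : List (List String)), Dom_split_sentences_into_words raw_data → Pre_split_sentences_into_words raw_data → Spec_split_sentences_into_words raw_data (split_sentences_into_words raw_data)

-- ===== LEMMAS AND PROOFS =====

-- Reference tokenizer: the pieces of `cur ++ cs` split at every space.
def pvPieces (cur : List Char) : List Char → List (List Char)
  | [] => [cur]
  | c :: rest => if c = ' ' then cur :: pvPieces [] rest else pvPieces (cur ++ [c]) rest

-- splitOn.go on the single-char separator [' '] computes pvPieces.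
lemma go_eq_pieces (cs : List Char) (rcur : List Char) (acc : List (List Char)) (fuel : Nat)
    (h : cs.length ≤ fuel) :
    PySem.Chars.splitOn.go [' '] fuel cs rcur acc = acc.reverse ++ pvPieces rcur.reverse cs := by
  induction cs generalizing rcur acc fuel with
  | nil => cases fuel <;> simp [PySem.Chars.splitOn.go, pvPieces]
  | cons c rest ih =>
    cases fuel with
    | zero => simp at h
    | succ fuel =>
      have h' : rest.length ≤ fuel := by simpa using h
      by_cases hc : c = ' '
      · subst hc
        have hpre : ([' '].isPrefixOf (' ' :: rest)) = true := by simp [List.isPrefixOf]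
        simp only [PySem.Chars.splitOn.go, hpre, if_true, List.length_cons, List.drop_succ_cons, List.length_nil, List.drop_zero]
        rw [ih [] (rcur.reverse :: acc) fuel h']
        simp [pvPieces]
      · have hpre : ([' '].isPrefixOf (c :: rest)) = false := by
          simp [List.isPrefixOf]; exact fun hh => hc hh.symm
        simp only [PySem.Chars.splitOn.go, hpre, Bool.false_eq_true, if_false]
        rw [ih (c :: rcur) acc fuel h']
        simp [pvPieces, hc]

lemma splitOn_eq_pieces (cs : List Char) :
    PySem.Chars.splitOn cs [' '] = pvPieces [] cs := by
  unfold PySem.Chars.splitOn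
  rw [go_eq_pieces cs [] [] (cs.length + 1) (Nat.le_succ _)]
  simp

-- split(" ") on a string is pvPieces of its characters, mapped to strings.
lemma split_getD_eq (w : String) :
    (PySem.Str.split? w " ").getD [] = (pvPieces [] w.toList).map String.ofList := by
  simp [PySem.Str.split?, PySem.Chars.split?, splitOn_eq_pieces]

-- A space-free string is one single piece.
lemma pieces_no_space (cs cur : List Char) (h : ' ' ∉ cs) : pvPieces cur cs = [cur ++ cs] := by
  induction cs generalizing cur with
  | nil => simp [pvPieces]
  | cons c rest ih =>
    have hc : ¬ c = ' ' := fun hh => h (hh ▸ List.mem_cons_self)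
    simp [pvPieces, hc, ih (cur ++ [c]) (fun hm => h (List.mem_cons_of_mem _ hm))]

-- A's space-detection loop computes "the string contains a space".
lemma foldl_space_flag (cs : List Char) (b : Bool) :
    cs.foldl (fun b c => if c = ' ' then true else b) b = (b || decide (' ' ∈ cs)) := by
  induction cs generalizing b with
  | nil => simp
  | cons c rest ih =>
    simp only [List.foldl_cons, ih]
    by_cases h : c = ' '
    · subst h; cases b <;> simp
    · have h' : ¬ (' ' = c) := fun hh => h hh.symm
      simp [h, h']

-- B's inner character loop, finished off, appends one row per piece.
lemma b_inner (r : String → List String) (cs cur : List Char) (words : List (List String)) :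
    (let st := cs.foldl
        (fun (p : List (List String) × List Char) character =>
          if character = ' ' then (p.1 ++ [r (String.ofList p.2)], [])
          else (p.1, p.2 ++ [character])) (words, cur)
     st.1 ++ [r (String.ofList st.2)])
    = words ++ (pvPieces cur cs).map (fun l => r (String.ofList l)) := by
  induction cs generalizing cur words with
  | nil => simp [pvPieces]
  | cons c rest ih =>
    by_cases hc : c = ' '
    · subst hc
      simp only [List.foldl_cons, reduceIte]
      rw [ih [] (words ++ [r (String.ofList cur)])]
      simp [pvPieces]
    · simp only [List.foldl_cons, if_neg hc]
      rw [ih (cur ++ [c]) words]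
      simp [pvPieces, hc]

-- ===== VERDICT (by name: the statement is the Claim_ definition above) =====
theorem split_sentences_into_words_spec : Claim_equal_split_sentences_into_words := by
  intro raw_data _ _
  unfold Spec_split_sentences_into_words split_sentences_into_words split_sentences_into_words_alt
  apply congrFun (congrFun (congrArg List.foldl (funext fun words => funext fun array => ?_)) []) raw_data
  simp only
  set w := PySem.List.pyGetD array 0 "" with hw
  set a1 := PySem.List.pyGetD array 1 "" with ha1
  set a2 := PySem.List.pyGetD array 2 "" with ha2
  set a3 := PySem.List.pyGetD array 3 "" with ha3
  rw [b_inner (fun s => [s, a1, a2, a3]) w.toList [] words]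
  rw [foldl_space_flag]
  by_cases hsp : ' ' ∈ w.toList
  · simp only [hsp, decide_true, Bool.false_or, if_true]
    rw [split_getD_eq]
    simp [List.map_map, Function.comp]
  · simp only [hsp, decide_false, Bool.false_or]
    rw [pieces_no_space w.toList [] hsp]
    simp
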